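-- pv_equiv track=rewrite | github.com/Jiang-Nan-A113/FInial_project | Traditional/Processing.py | perspective_find
-- ===== SOURCE A (Python) =====
-- def perspective_find(tag):
--     situation_focus = ""
--     perspective_str = []
--     perspective = [x for x, y in enumerate(tag) if y[1] == 'VB']
--     perspective = tag[perspective[0]]
--     if perspective[0] == 'happen':
--         situation_focus = 'Open situation'
--     else:
--         perspective = [x for x, y in enumerate(tag) if y[1] == "PRP"]
--         perspective = tag[perspective[0]]
--         if perspective[0] == 'you':
--             situation_focus = 'The robot'
--     return situation_focus
-- ===== SOURCE B (Python) =====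
-- def perspective_find(tag):
--     first_vb = None
--     first_prp = None
--     for pair in tag:
--         if first_vb is None and pair[1] == 'VB':
--             first_vb = pair
--         if first_prp is None and pair[1] == 'PRP':
--             first_prp = pair
--         if first_vb is not None and first_prp is not None:
--             break
--     if first_vb[0] == 'happen':
--         return 'Open situation'
--     if first_prp[0] == 'you':
--         return 'The robot'
--     return ''
-- ===== Notes on version B (the rewrite author's own statement) =====
-- stated objective: alternative
-- what changed: B replaces A's two index-building comprehensions plus list indexing by a single early-stopping pass that records the first VB and first PRP pairs directly, then decides from those.
import Mathlib
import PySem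

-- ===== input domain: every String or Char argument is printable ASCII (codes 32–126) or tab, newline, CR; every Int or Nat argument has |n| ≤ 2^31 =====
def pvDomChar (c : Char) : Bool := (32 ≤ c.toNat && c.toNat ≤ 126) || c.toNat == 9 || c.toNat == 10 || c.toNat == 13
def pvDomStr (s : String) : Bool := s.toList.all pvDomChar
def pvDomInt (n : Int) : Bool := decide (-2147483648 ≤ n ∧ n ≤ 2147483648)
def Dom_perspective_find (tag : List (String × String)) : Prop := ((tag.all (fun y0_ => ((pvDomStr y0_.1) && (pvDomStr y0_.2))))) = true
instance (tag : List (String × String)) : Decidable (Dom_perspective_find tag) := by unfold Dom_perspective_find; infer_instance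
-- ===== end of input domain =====

-- B replaces A's two index-building comprehensions plus list indexing by a single
-- early-stopping pass recording the first VB and first PRP pairs; same return values.

-- ===== PORT A =====
-- literal port of A: two enumerate-comprehensions building index lists, then tag[idx[0]];
-- pyGet? = none is Python's IndexError, excluded by Pre_ below.
def perspective_find (tag : List (String × String)) : String :=
  let situation_focus := ""
  let perspective := (PySem.List.enumerate tag).filterMap
    (fun xy => if xy.2.2 == "VB" then some xy.1 else none)
  match PySem.List.pyGet? perspective 0 with
  | none => situation_focus   -- IndexError in Python (no VB); outside Pre_
  | some i =>
    match PySem.List.pyGet? tag i with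
    | none => situation_focus
    | some p =>
      if p.1 == "happen" then "Open situation"
      else
        let perspective2 := (PySem.List.enumerate tag).filterMap
          (fun xy => if xy.2.2 == "PRP" then some xy.1 else none)
        match PySem.List.pyGet? perspective2 0 with
        | none => situation_focus   -- IndexError in Python (no PRP); outside Pre_
        | some j =>
          match PySem.List.pyGet? tag j with
          | none => situation_focus
          | some q => if q.1 == "you" then "The robot" else situation_focus

-- ===== PORT B =====
-- single pass with early exit, recording the first VB pair and first PRP pair
def pfLoop : List (String × String) → Option (String × String) → Option (String × String) →
    Option (String × String) × Option (String × String)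
  | [], vb, prp => (vb, prp)
  | p :: rest, vb, prp =>
    let vb' := if vb.isNone && p.2 == "VB" then some p else vb
    let prp' := if prp.isNone && p.2 == "PRP" then some p else prp
    if vb'.isSome && prp'.isSome then (vb', prp') else pfLoop rest vb' prp'

def perspective_find_alt (tag : List (String × String)) : String :=
  let r := pfLoop tag none none
  match r.1 with
  | none => ""   -- Python B raises here (first_vb is None); outside Pre_
  | some v =>
    if v.1 == "happen" then "Open situation"
    else
      match r.2 with
      | none => ""   -- Python B raises here (first_prp is None); outside Pre_
      | some q => if q.1 == "you" then "The robot" else ""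

-- ===== PRECONDITION & SPEC =====
-- Pre_ excludes exactly the inputs where A raises IndexError: no 'VB'-tagged token,
-- or the first 'VB' token's word is not 'happen' and there is no 'PRP'-tagged token.
def Pre_perspective_find (tag : List (String × String)) : Prop :=
  (tag.find? (fun p => p.2 == "VB")).isSome = true ∧
  (((tag.find? (fun p => p.2 == "VB")).getD ("", "")).1 = "happen" ∨
    tag.any (fun q => q.2 == "PRP") = true)
instance (tag : List (String × String)) : Decidable (Pre_perspective_find tag) := by
  unfold Pre_perspective_find; infer_instance

def pvWitness_perspective_find : (List (String × String)) := [("you", "PRP"), ("go", "VB")]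

def Spec_perspective_find (tag : List (String × String)) (out : String) : Prop := out = perspective_find_alt tag
instance (tag : List (String × String)) (out : String) : Decidable (Spec_perspective_find tag out) := by unfold Spec_perspective_find; infer_instance

-- ===== CLAIM (what is proved, stated in full; the proofs are below) =====
def Claim_equal_perspective_find : Prop := ∀ (tag : List (String × String)), Dom_perspective_find tag → Pre_perspective_find tag → Spec_perspective_find tag (perspective_find tag)

-- ===== LEMMAS AND PROOFS =====

-- A-side: the head of the comprehension's index list is findIdx?, shifted by the start offset
theorem head_filterMap_enumerate {α : Type} (pred : α → Bool) :
    ∀ (tag : List α) (s : Int),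
      (((PySem.List.enumerate tag s).filterMap
          (fun xy => if pred xy.2 then some xy.1 else none)).head?) =
      (List.findIdx? pred tag).map (fun k => s + (k : Int)) := by
  intro tag
  induction tag with
  | nil => intro s; simp [PySem.List.enumerate_nil]
  | cons x xs ih =>
    intro s
    rw [PySem.List.enumerate_cons]
    by_cases h : pred x
    · simp [h, List.findIdx?_cons]
    · simp only [List.filterMap_cons, if_neg h]
      rw [ih (s + 1)]
      simp [List.findIdx?_cons, h]
      cases List.findIdx? pred xs with
      | none => simp
      | some k => simp; ring

-- indexing at findIdx? gives find?
theorem getElem?_findIdx? {α : Type} (pred : α → Bool) :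
    ∀ (tag : List α) (k : Nat), List.findIdx? pred tag = some k →
      tag[k]? = tag.find? pred := by
  intro tag
  induction tag with
  | nil => intro k h; simp [List.findIdx?_nil] at h
  | cons x xs ih =>
    intro k h
    rw [List.findIdx?_cons] at h
    by_cases hx : pred x
    · simp [hx] at h; subst h; simp [List.find?, hx]
    · simp [hx] at h
      obtain ⟨j, hj, rfl⟩ := h
      simp [List.find?, hx, ih j hj]

-- A's "index-list head then tag[i]" equals find?
theorem firstMatch {α : Type} (pred : α → Bool) (tag : List α) :
    (((PySem.List.enumerate tag 0).filterMap
        (fun xy => if pred xy.2 then some xy.1 else none)).head?).bind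
      (fun i => PySem.List.pyGet? tag i) = tag.find? pred := by
  rw [head_filterMap_enumerate pred tag 0]
  cases h : List.findIdx? pred tag with
  | none =>
    simp
    cases hf : tag.find? pred with
    | none => rfl
    | some v =>
      exfalso
      have := List.findIdx?_eq_none_iff.mp h
      have hv := List.find?_eq_some_iff_append.mp hf
      obtain ⟨hp, as, bs, rfl, _⟩ := hv
      have := this v (by simp)
      simp [hp] at this
  | some k =>
    simp [getElem?_findIdx? pred tag k h]

-- B-side: the early-exit loop computes the two first matches
theorem pfLoop_eq (l : List (String × String)) :
    ∀ (vb prp : Option (String × String)),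
      pfLoop l vb prp =
        (vb.or (l.find? (fun p => p.2 == "VB")), prp.or (l.find? (fun p => p.2 == "PRP"))) := by
  induction l with
  | nil => intro vb prp; simp [pfLoop]
  | cons p rest ih =>
    intro vb prp
    cases hB : p.2 == "VB" <;> cases hP : p.2 == "PRP" <;>
      cases vb <;> cases prp <;>
      simp [pfLoop, List.find?, Option.or, ih, hB, hP]

-- ===== VERDICT (by name: the statement is the Claim_ definition above) =====
theorem perspective_find_spec : Claim_equal_perspective_find := by
  intro tag _ hpre
  obtain ⟨hvb, hrest⟩ := hpre
  unfold Spec_perspective_find perspective_find perspective_find_alt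
  rw [pfLoop_eq tag none none]
  simp only [Option.or]
  have hA := firstMatch (fun p => p.2 == "VB") tag
  have hP := firstMatch (fun q => q.2 == "PRP") tag
  cases hv : tag.find? (fun p => p.2 == "VB") with
  | none => rw [hv] at hvb; simp at hvb
  | some v =>
    rw [hv] at hA
    -- A's first bind: head? then pyGet? both succeed, yielding v
    have h1 : PySem.List.pyGet? ((PySem.List.enumerate tag 0).filterMap
        (fun xy => if xy.2.2 == "VB" then some xy.1 else none)) 0 =
        ((PySem.List.enumerate tag 0).filterMap
        (fun xy => if xy.2.2 == "VB" then some xy.1 else none)).head? := by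
      rw [PySem.List.pyGet?_zero, ← List.head?_eq_getElem?]
    have h1' : PySem.List.pyGet? ((PySem.List.enumerate tag 0).filterMap
        (fun xy => if xy.2.2 == "PRP" then some xy.1 else none)) 0 =
        ((PySem.List.enumerate tag 0).filterMap
        (fun xy => if xy.2.2 == "PRP" then some xy.1 else none)).head? := by
      rw [PySem.List.pyGet?_zero, ← List.head?_eq_getElem?]
    rw [h1, h1']
    cases hh : ((PySem.List.enumerate tag 0).filterMap
        (fun xy => if xy.2.2 == "VB" then some xy.1 else none)).head? with
    | none => rw [hh] at hA; simp at hA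
    | some i =>
      rw [hh] at hA
      simp only [Option.bind_some] at hA
      simp only [hA]
      by_cases hhap : v.1 == "happen"
      · simp [hhap]
      · rw [if_neg hhap, if_neg hhap]
        -- need a PRP match
        have hprp : (tag.find? (fun q => q.2 == "PRP")).isSome = true := by
          rcases hrest with h | h
          · exfalso; rw [hv] at h; simp at h
            exact hhap (by simp [h])
          · rw [List.find?_isSome]
            obtain ⟨q, hq, hq2⟩ := List.any_eq_true.mp h
            exact ⟨q, hq, hq2⟩
        cases hq : tag.find? (fun q => q.2 == "PRP") with
        | none => rw [hq] at hprp; simp at hprp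
        | some q =>
          rw [hq] at hP
          cases hh2 : ((PySem.List.enumerate tag 0).filterMap
              (fun xy => if xy.2.2 == "PRP" then some xy.1 else none)).head? with
          | none => rw [hh2] at hP; simp at hP
          | some j =>
            rw [hh2] at hP
            simp only [Option.bind_some] at hP
            simp [hP]
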